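-- pv_equiv track=rewrite | github.com/vijayrohit/CricketAiAnalyzerV2 | services/report_generator.py | _suggest_practice_drills
-- ===== SOURCE A (Python) =====
-- from typing import Dict, List, Any
--
-- def _suggest_practice_drills(weaknesses: List[Dict]) -> List[str]:
--     """Suggest specific practice drills based on weaknesses."""
--     drills = []
--
--     weakness_categories = [w.get('category') for w in weaknesses]
--
--     if 'stance' in weakness_categories:
--         drills.append("Mirror work for stance positioning")
--         drills.append("Balance exercises on one foot")
--
--     if 'head_position' in weakness_categories:
--         drills.append("Head still drills with tennis ball on head")
--         drills.append("Eye tracking exercises")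
--
--     if 'balance' in weakness_categories:
--         drills.append("Single-leg balance exercises")
--         drills.append("Wobble board training")
--
--     if 'arm_position' in weakness_categories:
--         drills.append("Shadow batting with focus on arm position")
--         drills.append("Grip strengthening exercises")
--
--     if not drills:
--         drills.extend([
--             "Regular net practice",
--             "Video analysis sessions",
--             "Technique refinement with coach"
--         ])
--
--     return drills
-- ===== SOURCE B (Python) =====
-- _BIT = {'stance': 1, 'head_position': 2, 'balance': 4, 'arm_position': 8}
--
-- _DRILLS = [
--     ["Mirror work for stance positioning", "Balance exercises on one foot"],
--     ["Head still drills with tennis ball on head", "Eye tracking exercises"],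
--     ["Single-leg balance exercises", "Wobble board training"],
--     ["Shadow batting with focus on arm position", "Grip strengthening exercises"],
-- ]
--
-- _FALLBACK = ["Regular net practice",
--              "Video analysis sessions",
--              "Technique refinement with coach"]
--
--
-- def _suggest_practice_drills(weaknesses):
--     """Suggest practice drills: fold the weaknesses into a 4-bit category mask,
--     then decode the mask bit by bit into the ordered drill lists."""
--     mask = 0
--     for w in weaknesses:
--         mask |= _BIT.get(w.get('category'), 0)
--     if not mask:
--         return list(_FALLBACK)
--     out = []
--     for ds in _DRILLS:
--         if mask & 1:
--             out.extend(ds)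
--         mask >>= 1
--     return out
-- ===== Notes on version B (the rewrite author's own statement) =====
-- stated objective: alternative
-- what changed: Instead of building the category list and scanning it with four membership tests, B folds the weaknesses in one pass into a 4-bit integer mask (OR-ing a per-category bit) and then decodes the mask bit by bit into the ordered drill lists, with the fallback when the mask is zero.
import Mathlib
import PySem

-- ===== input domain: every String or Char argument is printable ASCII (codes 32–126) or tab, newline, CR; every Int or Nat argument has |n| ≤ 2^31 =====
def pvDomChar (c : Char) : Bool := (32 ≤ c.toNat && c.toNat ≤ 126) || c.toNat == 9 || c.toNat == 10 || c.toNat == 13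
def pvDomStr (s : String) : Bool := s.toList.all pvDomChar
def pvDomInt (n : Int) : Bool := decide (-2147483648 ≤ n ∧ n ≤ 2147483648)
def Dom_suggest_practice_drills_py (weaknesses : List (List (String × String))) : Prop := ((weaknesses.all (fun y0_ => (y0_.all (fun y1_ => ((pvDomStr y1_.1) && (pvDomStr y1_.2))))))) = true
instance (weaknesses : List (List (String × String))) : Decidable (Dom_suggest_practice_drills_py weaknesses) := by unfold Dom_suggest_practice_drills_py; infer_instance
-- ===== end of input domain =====

-- B replaces A's category-list + four membership scans by one fold into a 4-bit
-- integer mask that is then decoded bit by bit (objective: alternative).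

-- ===== PORT A =====
def suggest_practice_drills_py (weaknesses : List (List (String × String))) : List String :=
  let drills : List String := []
  let weakness_categories : List (Option String) :=
    weaknesses.map (fun w => PySem.Dict.get? (PySem.Dict.mk w) "category")
  let drills := if (some "stance") ∈ weakness_categories then
      drills ++ ["Mirror work for stance positioning", "Balance exercises on one foot"]
    else drills
  let drills := if (some "head_position") ∈ weakness_categories then
      drills ++ ["Head still drills with tennis ball on head", "Eye tracking exercises"]
    else drills
  let drills := if (some "balance") ∈ weakness_categories then
      drills ++ ["Single-leg balance exercises", "Wobble board training"]
    else drills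
  let drills := if (some "arm_position") ∈ weakness_categories then
      drills ++ ["Shadow batting with focus on arm position", "Grip strengthening exercises"]
    else drills
  if drills = [] then
    drills ++ ["Regular net practice", "Video analysis sessions", "Technique refinement with coach"]
  else drills

-- ===== PORT B =====
-- _BIT.get(w.get('category'), 0): the outer .get's key may be None, which is never a key
-- of _BIT, so the None case returns the default 0 — matched exactly by the Option split.
-- The mask is a nonnegative bit pattern throughout, so it is carried as a Nat.
def pvBit (c : Option String) : Nat :=
  match c with
  | some s => PySem.Dict.getD (PySem.Dict.mk
      [("stance", 1), ("head_position", 2), ("balance", 4), ("arm_position", 8)]) s 0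
  | none => 0

def pvDrills : List (List String) :=
  [["Mirror work for stance positioning", "Balance exercises on one foot"],
   ["Head still drills with tennis ball on head", "Eye tracking exercises"],
   ["Single-leg balance exercises", "Wobble board training"],
   ["Shadow batting with focus on arm position", "Grip strengthening exercises"]]

def pvFallback : List String :=
  ["Regular net practice", "Video analysis sessions", "Technique refinement with coach"]

def suggest_practice_drills_py_alt (weaknesses : List (List (String × String))) : List String :=
  let mask : Nat := weaknesses.foldl
    (fun m w => m ||| pvBit (PySem.Dict.get? (PySem.Dict.mk w) "category")) 0
  if mask = 0 then pvFallback
  else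
    let st := pvDrills.foldl
      (fun (st : List String × Nat) ds =>
        ((if st.2 &&& 1 ≠ 0 then st.1 ++ ds else st.1), st.2 >>> 1))
      ([], mask)
    st.1

-- ===== PRECONDITION & SPEC =====
def Spec_suggest_practice_drills_py (weaknesses : List (List (String × String))) (out : List String) : Prop := out = suggest_practice_drills_py_alt weaknesses
instance (weaknesses : List (List (String × String))) (out : List String) : Decidable (Spec_suggest_practice_drills_py weaknesses out) := by unfold Spec_suggest_practice_drills_py; infer_instance

-- ===== CLAIM (what is proved, stated in full; the proofs are below) =====
def Claim_equal_suggest_practice_drills_py : Prop := ∀ (weaknesses : List (List (String × String))), Dom_suggest_practice_drills_py weaknesses → Spec_suggest_practice_drills_py weaknesses (suggest_practice_drills_py weaknesses)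

-- ===== LEMMAS AND PROOFS =====

-- closed form of B's mask fold: one bit per category that occurs in the list
lemma pv_mask_eq (ws : List (List (String × String))) (m : Nat) :
    ws.foldl (fun m w => m ||| pvBit (PySem.Dict.get? (PySem.Dict.mk w) "category")) m
      = m |||
        ((cond (decide ((some "stance") ∈ ws.map (fun w => PySem.Dict.get? (PySem.Dict.mk w) "category"))) 1 0) |||
         (cond (decide ((some "head_position") ∈ ws.map (fun w => PySem.Dict.get? (PySem.Dict.mk w) "category"))) 2 0) |||
         (cond (decide ((some "balance") ∈ ws.map (fun w => PySem.Dict.get? (PySem.Dict.mk w) "category"))) 4 0) |||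
         (cond (decide ((some "arm_position") ∈ ws.map (fun w => PySem.Dict.get? (PySem.Dict.mk w) "category"))) 8 0)) := by
  induction ws generalizing m with
  | nil => simp
  | cons w ws ih =>
    simp only [List.foldl_cons, List.map_cons, List.mem_cons, ih, Bool.decide_or]
    rw [Nat.or_assoc]
    congr 1
    generalize decide ((some "stance") ∈ ws.map (fun w => PySem.Dict.get? (PySem.Dict.mk w) "category")) = b1
    generalize decide ((some "head_position") ∈ ws.map (fun w => PySem.Dict.get? (PySem.Dict.mk w) "category")) = b2
    generalize decide ((some "balance") ∈ ws.map (fun w => PySem.Dict.get? (PySem.Dict.mk w) "category")) = b3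
    generalize decide ((some "arm_position") ∈ ws.map (fun w => PySem.Dict.get? (PySem.Dict.mk w) "category")) = b4
    rcases hc : PySem.Dict.get? (PySem.Dict.mk w) "category" with _ | s
    · simp [pvBit]
    · by_cases h1 : s = "stance"
      · subst h1
        simp [pvBit, PySem.Dict.getD, PySem.Dict.get?]
        all_goals (cases b1 <;> cases b2 <;> cases b3 <;> cases b4 <;> decide)
      · by_cases h2 : s = "head_position"
        · subst h2
          simp [pvBit, PySem.Dict.getD, PySem.Dict.get?]
          all_goals (cases b1 <;> cases b2 <;> cases b3 <;> cases b4 <;> decide)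
        · by_cases h3 : s = "balance"
          · subst h3
            simp [pvBit, PySem.Dict.getD, PySem.Dict.get?]
            all_goals (cases b1 <;> cases b2 <;> cases b3 <;> cases b4 <;> decide)
          · by_cases h4 : s = "arm_position"
            · subst h4
              simp [pvBit, PySem.Dict.getD, PySem.Dict.get?]
              all_goals (cases b1 <;> cases b2 <;> cases b3 <;> cases b4 <;> decide)
            · simp [pvBit, PySem.Dict.getD, PySem.Dict.get?,
                eq_false (Ne.symm h1), eq_false (Ne.symm h2),
                eq_false (Ne.symm h3), eq_false (Ne.symm h4)]

-- ===== VERDICT (by name: the statement is the Claim_ definition above) =====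
theorem suggest_practice_drills_py_spec : Claim_equal_suggest_practice_drills_py := by
  intro ws _
  unfold Spec_suggest_practice_drills_py suggest_practice_drills_py suggest_practice_drills_py_alt
  rw [pv_mask_eq]
  by_cases h1 : (some "stance") ∈ ws.map (fun w => PySem.Dict.get? (PySem.Dict.mk w) "category") <;>
  by_cases h2 : (some "head_position") ∈ ws.map (fun w => PySem.Dict.get? (PySem.Dict.mk w) "category") <;>
  by_cases h3 : (some "balance") ∈ ws.map (fun w => PySem.Dict.get? (PySem.Dict.mk w) "category") <;>
  by_cases h4 : (some "arm_position") ∈ ws.map (fun w => PySem.Dict.get? (PySem.Dict.mk w) "category") <;>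
  simp [h1, h2, h3, h4, pvDrills, pvFallback]
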